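-- pv_equiv track=rewrite | github.com/AlexOzr174/HealthAI | ai_engine/recipe_generator.py | _prioritize_available
-- ===== SOURCE A (Python) =====
-- from typing import Dict, List, Optional, Tuple
--
-- def _prioritize_available(ingredients: List[str], available: List[str]) -> List[str]:
--     """Приоритизация доступных продуктов"""
--     available_lower = [a.lower() for a in available]
--
--     # Если есть совпадения, используем их
--     prioritized = []
--     for ing in ingredients:
--         if any(a in ing.lower() or ing.lower() in a for a in available_lower):
--             prioritized.append(ing)
--
--     # Добавляем остальные
--     for ing in ingredients:
--         if ing not in prioritized:
--             prioritized.append(ing)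
--
--     return prioritized
-- ===== SOURCE B (Python) =====
-- def _prioritize_available(ingredients, available):
--     """Single pass: partition into matched / deduped rest, then concatenate."""
--     available_lower = [a.lower() for a in available]
--     matched = []
--     rest = []
--     for ing in ingredients:
--         low = ing.lower()
--         if any(a in low or low in a for a in available_lower):
--             matched.append(ing)
--         elif ing not in rest:
--             rest.append(ing)
--     return matched + rest
-- ===== Notes on version B (the rewrite author's own statement) =====
-- stated objective: faster
-- what changed: Replaces A's two passes over ingredients (collect matches, then re-scan the whole list testing membership in the growing result) by one pass that partitions into a matched list and a deduplicated rest list, lowercasing each ingredient once, and returns matched + rest; matching items never incur a list-membership test.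
import Mathlib
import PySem

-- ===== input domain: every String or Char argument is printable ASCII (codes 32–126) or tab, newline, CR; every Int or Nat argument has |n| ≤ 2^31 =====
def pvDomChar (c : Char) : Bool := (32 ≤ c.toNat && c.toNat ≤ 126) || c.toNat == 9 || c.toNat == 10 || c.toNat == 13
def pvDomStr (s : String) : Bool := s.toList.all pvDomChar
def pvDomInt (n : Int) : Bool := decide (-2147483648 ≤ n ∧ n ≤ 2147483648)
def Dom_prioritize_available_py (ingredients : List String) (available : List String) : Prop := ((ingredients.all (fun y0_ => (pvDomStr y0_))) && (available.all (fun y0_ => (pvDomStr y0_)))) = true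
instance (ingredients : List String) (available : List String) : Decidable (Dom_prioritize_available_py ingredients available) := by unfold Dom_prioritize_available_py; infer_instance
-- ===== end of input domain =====

-- ===== PORT A =====
-- A: two passes â collect matching ingredients, then re-scan appending items not already present.
def prioritize_available_py (ingredients : List String) (available : List String) : List String :=
  let available_lower := available.map (fun a => PySem.Str.lower a)
  let prioritized := ingredients.foldl (fun acc ing =>
    if available_lower.any (fun a =>
        PySem.Str.isIn a (PySem.Str.lower ing) || PySem.Str.isIn (PySem.Str.lower ing) a)
    then acc ++ [ing] else acc) []
  ingredients.foldl (fun acc ing => if ing ∈ acc then acc else acc ++ [ing]) prioritized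

-- ===== PORT B =====
-- B: one pass partitioning into matched / deduplicated rest, then matched ++ rest.
def prioritize_available_py_alt (ingredients : List String) (available : List String) : List String :=
  let available_lower := available.map (fun a => PySem.Str.lower a)
  let mr := ingredients.foldl (fun (mr : List String × List String) ing =>
    let low := PySem.Str.lower ing
    if available_lower.any (fun a => PySem.Str.isIn a low || PySem.Str.isIn low a)
    then (mr.1 ++ [ing], mr.2)
    else if ing ∈ mr.2 then mr else (mr.1, mr.2 ++ [ing])) ([], [])
  mr.1 ++ mr.2

-- ===== PRECONDITION & SPEC =====
def Spec_prioritize_available_py (ingredients : List String) (available : List String) (out : List String) : Prop := out = prioritize_available_py_alt ingredients available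
instance (ingredients : List String) (available : List String) (out : List String) : Decidable (Spec_prioritize_available_py ingredients available out) := by unfold Spec_prioritize_available_py; infer_instance

-- ===== CLAIM (what is proved, stated in full; the proofs are below) =====
def Claim_equal_prioritize_available_py : Prop := ∀ (ingredients : List String) (available : List String), Dom_prioritize_available_py ingredients available → Spec_prioritize_available_py ingredients available (prioritize_available_py ingredients available)

-- ===== LEMMAS AND PROOFS =====


-- matching predicate shared by the proofs
def pvMatch (availL : List String) (ing : String) : Bool :=
  availL.any (fun a =>
    PySem.Str.isIn a (PySem.Str.lower ing) || PySem.Str.isIn (PySem.Str.lower ing) a)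

theorem pvFilterFold (p : String → Bool) (l : List String) (m : List String) :
    l.foldl (fun acc ing => if p ing then acc ++ [ing] else acc) m = m ++ l.filter p := by
  induction l generalizing m with
  | nil => simp
  | cons x xs ih =>
    simp only [List.foldl_cons, List.filter_cons]
    by_cases h : p x = true
    · simp [h, ih]
    · simp [h, ih]
    
theorem pvBFold (p : String → Bool) (l : List String) (m r : List String) :
    l.foldl (fun (mr : List String × List String) ing =>
      if p ing then (mr.1 ++ [ing], mr.2)
      else if ing ∈ mr.2 then mr else (mr.1, mr.2 ++ [ing])) (m, r)
    = (m ++ l.filter p,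
       l.foldl (fun r ing => if p ing then r else if ing ∈ r then r else r ++ [ing]) r) := by
  induction l generalizing m r with
  | nil => simp
  | cons x xs ih =>
    simp only [List.foldl_cons, List.filter_cons]
    by_cases h : p x = true
    · simp [h, ih]
    · by_cases hr : x ∈ r <;> simp [h, hr, ih]

theorem pvSecondLoop (p : String → Bool) (l : List String) (m r : List String)
    (hl : ∀ ing ∈ l, p ing = true → ing ∈ m) (hm : ∀ x ∈ m, p x = true) :
    l.foldl (fun acc ing => if ing ∈ acc then acc else acc ++ [ing]) (m ++ r)
    = m ++ l.foldl (fun r ing => if p ing then r else if ing ∈ r then r else r ++ [ing]) r := by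
  induction l generalizing r with
  | nil => rfl
  | cons x xs ih =>
    simp only [List.foldl_cons]
    by_cases h : p x = true
    · have hxm : x ∈ m := hl x (by simp) h
      have : x ∈ m ++ r := List.mem_append.mpr (Or.inl hxm)
      simp only [h, if_pos this, if_true]
      exact ih r (fun i hi => hl i (by simp [hi]))
    · have hxm : x ∉ m := fun hx => h (hm x hx)
      have hmem : (x ∈ m ++ r) ↔ (x ∈ r) := by simp [List.mem_append, hxm]
      by_cases hr : x ∈ r
      · simp only [h, if_pos (hmem.mpr hr), if_pos hr]
        exact ih r (fun i hi => hl i (by simp [hi]))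
      · have : x ∉ m ++ r := fun hx => hr (hmem.mp hx)
        simp only [h, if_neg this, if_neg hr, List.append_assoc]
        exact ih (r ++ [x]) (fun i hi => hl i (by simp [hi]))

-- ===== VERDICT (by name: the statement is the Claim_ definition above) =====
theorem prioritize_available_py_spec : Claim_equal_prioritize_available_py := by
  intro ingredients available _
  unfold Spec_prioritize_available_py prioritize_available_py prioritize_available_py_alt
  show ingredients.foldl (fun acc ing => if ing ∈ acc then acc else acc ++ [ing])
      (ingredients.foldl (fun acc ing =>
        if pvMatch (available.map (fun a => PySem.Str.lower a)) ing then acc ++ [ing] else acc) [])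
    = (ingredients.foldl (fun (mr : List String × List String) ing =>
        if pvMatch (available.map (fun a => PySem.Str.lower a)) ing then (mr.1 ++ [ing], mr.2)
        else if ing ∈ mr.2 then mr else (mr.1, mr.2 ++ [ing])) ([], [])).1
      ++ (ingredients.foldl (fun (mr : List String × List String) ing =>
        if pvMatch (available.map (fun a => PySem.Str.lower a)) ing then (mr.1 ++ [ing], mr.2)
        else if ing ∈ mr.2 then mr else (mr.1, mr.2 ++ [ing])) ([], [])).2
  rw [pvFilterFold, pvBFold (pvMatch (available.map (fun a => PySem.Str.lower a)))]
  simp only [List.nil_append]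
  have h := pvSecondLoop (pvMatch (available.map (fun a => PySem.Str.lower a))) ingredients
    (ingredients.filter (pvMatch (available.map (fun a => PySem.Str.lower a)))) []
    (fun ing hi hp => List.mem_filter.mpr ⟨hi, hp⟩)
    (fun x hx => (List.mem_filter.mp hx).2)
  rw [List.append_nil] at h
  exact h
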